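-- pv_equiv track=rewrite | github.com/IonesiCristi/GenerareOutPut | informal.py | useContractions
-- ===== SOURCE A (Python) =====
-- def useContractions(text):
--     '''It makes use of Contractions.'''
--     dictionar = {
--         " not": "n't",
--         " are": "'re",
--         " is": "'s",
--         " will": "'ll",
--         " am": "'m"
--     }
--     for i in dictionar.keys() :
--         text = text.replace (i, dictionar[i])
--     return text
-- ===== SOURCE B (Python) =====
-- def useContractions(text):
--     '''It makes use of Contractions.'''
--     repl = {"not": "n't", "are": "'re", "is": "'s", "will": "'ll", "am": "'m"}
--     out = []
--     i = 0
--     n = len(text)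
--     while i < n:
--         if text[i] == ' ':
--             for w, r in repl.items():
--                 if text.startswith(w, i + 1):
--                     out.append(r)
--                     i += 1 + len(w)
--                     break
--             else:
--                 out.append(' ')
--                 i += 1
--         else:
--             out.append(text[i])
--             i += 1
--     return ''.join(out)
-- ===== Notes on version B (the rewrite author's own statement) =====
-- stated objective: alternative
-- what changed: Replaces five sequential full-text str.replace passes by a single left-to-right scan that, at each space, matches one of the five phrases and emits its contraction; it trades the C-speed str.replace calls for one interpreted pass.
import Mathlib
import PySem

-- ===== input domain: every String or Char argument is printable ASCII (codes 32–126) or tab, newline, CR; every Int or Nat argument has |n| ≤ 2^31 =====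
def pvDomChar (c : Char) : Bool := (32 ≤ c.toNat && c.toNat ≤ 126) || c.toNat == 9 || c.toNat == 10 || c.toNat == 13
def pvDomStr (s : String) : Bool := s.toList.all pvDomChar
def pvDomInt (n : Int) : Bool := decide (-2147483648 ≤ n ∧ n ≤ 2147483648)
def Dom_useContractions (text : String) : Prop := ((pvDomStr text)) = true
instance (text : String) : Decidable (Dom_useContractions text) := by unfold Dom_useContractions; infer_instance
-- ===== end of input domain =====

set_option maxRecDepth 4096


-- B replaces A's five sequential full-text str.replace passes by a single left-to-right scan
-- that, at each space, matches one of the five phrases and emits its contraction (objective: alternative).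

-- ===== PORT A =====
-- literal transliteration of A: build the dict, then for each key replace it in the text
def useContractions (text : String) : String :=
  let dictionar : PySem.Dict String String :=
    ((((PySem.Dict.empty.insert " not" "n't").insert " are" "'re").insert " is" "'s").insert
        " will" "'ll").insert " am" "'m"
  dictionar.keys.foldl (fun t i => PySem.Str.replace t i ((dictionar.get? i).getD "")) text

-- ===== PORT B =====
-- transliteration of B's single while-loop scan: at a space, try the five words in dict order
-- (startswith at i+1), emit the contraction and skip; otherwise copy the character
def onePassContr : List Char → List Char
  | [] => []
  | c :: t =>
    if c = ' ' then
      if ['n','o','t'].isPrefixOf t then 'n' :: '\'' :: 't' :: onePassContr (t.drop 3)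
      else if ['a','r','e'].isPrefixOf t then '\'' :: 'r' :: 'e' :: onePassContr (t.drop 3)
      else if ['i','s'].isPrefixOf t then '\'' :: 's' :: onePassContr (t.drop 2)
      else if ['w','i','l','l'].isPrefixOf t then '\'' :: 'l' :: 'l' :: onePassContr (t.drop 4)
      else if ['a','m'].isPrefixOf t then '\'' :: 'm' :: onePassContr (t.drop 2)
      else c :: onePassContr t
    else c :: onePassContr t
termination_by l => l.length
decreasing_by all_goals simp [List.length_drop]

def useContractions_alt (text : String) : String :=
  String.ofList (onePassContr text.toList)

-- ===== PRECONDITION & SPEC =====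
def Spec_useContractions (text : String) (out : String) : Prop := out = useContractions_alt text
instance (text : String) (out : String) : Decidable (Spec_useContractions text out) := by unfold Spec_useContractions; infer_instance

-- ===== CLAIM (what is proved, stated in full; the proofs are below) =====
def Claim_equal_useContractions : Prop := ∀ (text : String), Dom_useContractions text → Spec_useContractions text (useContractions text)

-- ===== LEMMAS AND PROOFS =====

-- structural characterisation of Python's str.replace (for a nonempty pattern)
def repC (p r : List Char) : List Char → List Char
  | [] => []
  | c :: t =>
    if p.isPrefixOf (c :: t) then r ++ repC p r (t.drop (p.length - 1))
    else c :: repC p r t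
termination_by l => l.length
decreasing_by all_goals simp [List.length_drop]

theorem repC_nil (p r : List Char) : repC p r [] = [] := by rw [repC]

theorem repC_pos (p r t : List Char) (c : Char) (h : p.isPrefixOf (c :: t) = true) :
    repC p r (c :: t) = r ++ repC p r (t.drop (p.length - 1)) := by
  rw [repC]; simp [h]

theorem repC_neg (p r t : List Char) (c : Char) (h : p.isPrefixOf (c :: t) = false) :
    repC p r (c :: t) = c :: repC p r t := by
  rw [repC]; simp [h]

theorem go_eq_repC (p r : List Char) (hp : p ≠ []) :
    ∀ (fuel : Nat) (l acc : List Char), l.length ≤ fuel →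
      PySem.Chars.replace.go p r fuel l acc = acc.reverse ++ repC p r l := by
  intro fuel
  induction fuel with
  | zero =>
    intro l acc hl
    have : l = [] := by cases l <;> simp_all
    subst this
    rw [PySem.Chars.replace.go, repC_nil]
  | succ n ih =>
    intro l acc hl
    cases l with
    | nil => rw [PySem.Chars.replace.go, repC_nil] <;> simp
    | cons c t =>
      rw [PySem.Chars.replace.go]
      by_cases h : p <+: c :: t
      · have hb : p.isPrefixOf (c :: t) = true := List.isPrefixOf_iff_prefix.mpr h
        rw [if_pos hb]
        have hdrop : (c :: t).drop p.length = t.drop (p.length - 1) := by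
          cases p with
          | nil => exact absurd rfl hp
          | cons a q => simp
        rw [hdrop, ih _ _ (by simp at hl ⊢; omega : (t.drop (p.length - 1)).length ≤ n)]
        rw [repC_pos p r t c hb]
        simp
      · have hb : p.isPrefixOf (c :: t) = false := by
          rw [Bool.eq_false_iff]
          exact fun hx => h (List.isPrefixOf_iff_prefix.mp hx)
        rw [if_neg (by simp [hb])]
        rw [ih _ _ (by simp at hl ⊢; omega : t.length ≤ n)]
        rw [repC_neg p r t c hb]
        simp

theorem replace_eq_repC (s p r : List Char) (hp : p ≠ []) :
    PySem.Chars.replace s p r = repC p r s := by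
  rw [PySem.Chars.replace]
  rw [if_neg (fun hx => hp (List.isEmpty_iff.mp hx))]
  simpa using go_eq_repC p r hp s.length s [] (le_refl _)

-- a character different from the pattern's first character passes through unchanged
theorem repC_cons_ne (a : Char) (p' r t : List Char) (c : Char) (hc : c ≠ a) :
    repC (a :: p') r (c :: t) = c :: repC (a :: p') r t := by
  apply repC_neg
  rw [Bool.eq_false_iff]
  intro hx
  exact hc (List.cons_prefix_cons.mp (List.isPrefixOf_iff_prefix.mp hx)).1.symm

-- and so does a whole block of such characters
theorem repC_append_ne (a : Char) (p' r : List Char) :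
    ∀ (u t : List Char), (∀ c ∈ u, c ≠ a) →
      repC (a :: p') r (u ++ t) = u ++ repC (a :: p') r t := by
  intro u
  induction u with
  | nil => intro t _; simp
  | cons c u' ih =>
    intro t hu
    simp only [List.cons_append]
    rw [repC_cons_ne a p' r _ c (hu c (by simp)),
        ih t (fun d hd => hu d (by simp [hd]))]

-- a word avoiding the replacement's first character that prefixes the output already prefixed the input
theorem repC_prefix_reflect (p : List Char) (rh : Char) (r' : List Char) :
    ∀ (n : Nat) (x w : List Char), x.length ≤ n → (∀ c ∈ w, c ≠ rh) →
      w <+: repC p (rh :: r') x → w <+: x := by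
  intro n
  induction n with
  | zero =>
    intro x w hx hw hpre
    have : x = [] := by cases x <;> simp_all
    subst this
    rwa [repC_nil] at hpre
  | succ m ih =>
    intro x w hx hw hpre
    cases x with
    | nil => rwa [repC_nil] at hpre
    | cons c t =>
      cases w with
      | nil => exact List.nil_prefix
      | cons c0 w' =>
        by_cases h : p <+: c :: t
        · rw [repC_pos p _ t c (List.isPrefixOf_iff_prefix.mpr h)] at hpre
          simp only [List.cons_append] at hpre
          obtain ⟨h0, -⟩ := List.cons_prefix_cons.mp hpre
          exact absurd h0 (hw c0 (by simp))
        · rw [repC_neg p _ t c (by rw [Bool.eq_false_iff]; exact fun hx => h (List.isPrefixOf_iff_prefix.mp hx))] at hpre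
          obtain ⟨hc, hpre'⟩ := List.cons_prefix_cons.mp hpre
          subst hc
          exact List.cons_prefix_cons.mpr
            ⟨rfl, ih t w' (by simp at hx; omega) (fun d hd => hw d (by simp [hd])) hpre'⟩

-- the five passes of A, at the character-list level
def passA (s : List Char) : List Char :=
  repC [' ','a','m'] ['\'','m']
    (repC [' ','w','i','l','l'] ['\'','l','l']
      (repC [' ','i','s'] ['\'','s']
        (repC [' ','a','r','e'] ['\'','r','e']
          (repC [' ','n','o','t'] ['n','\'','t'] s))))

theorem useContractions_eq_passA (text : String) :
    useContractions text = String.ofList (passA text.toList) := by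
  have h1 : useContractions text =
      PySem.Str.replace (PySem.Str.replace (PySem.Str.replace (PySem.Str.replace
        (PySem.Str.replace text " not" "n't") " are" "'re") " is" "'s") " will" "'ll") " am" "'m" := rfl
  rw [h1]
  simp only [PySem.Str.replace, String.toList_ofList]
  rw [replace_eq_repC _ _ _ (by simp), replace_eq_repC _ _ _ (by simp),
      replace_eq_repC _ _ _ (by simp), replace_eq_repC _ _ _ (by simp),
      replace_eq_repC _ _ _ (by simp)]
  rfl

theorem passA_eq_onePass : ∀ s : List Char, passA s = onePassContr s := by
  intro s
  induction s using onePassContr.induct with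
  | case1 => simp [passA, repC_nil, onePassContr]
  | case2 t h1 ih =>
    obtain ⟨t', rfl⟩ := List.isPrefixOf_iff_prefix.mp h1
    simp only [List.cons_append, List.nil_append] at h1 ih ⊢
    rw [onePassContr]
    rw [if_pos h1]
    simp only [List.drop_succ_cons, List.drop_zero] at ih ⊢
    unfold passA at ih ⊢
    have e1 : repC [' ','n','o','t'] ['n','\'','t'] (' '::'n'::'o'::'t'::t') =
        'n'::'\''::'t':: repC [' ','n','o','t'] ['n','\'','t'] t' := by
      rw [repC_pos _ _ _ _ (by simp [List.isPrefixOf])]; simp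
    have e2 : ∀ X, repC [' ','a','r','e'] ['\'','r','e'] ('n'::'\''::'t'::X) =
        'n'::'\''::'t':: repC [' ','a','r','e'] ['\'','r','e'] X := fun X => by
      simpa using repC_append_ne ' ' ['a','r','e'] ['\'','r','e'] ['n','\'','t'] X (by simp)
    have e3 : ∀ X, repC [' ','i','s'] ['\'','s'] ('n'::'\''::'t'::X) =
        'n'::'\''::'t':: repC [' ','i','s'] ['\'','s'] X := fun X => by
      simpa using repC_append_ne ' ' ['i','s'] ['\'','s'] ['n','\'','t'] X (by simp)
    have e4 : ∀ X, repC [' ','w','i','l','l'] ['\'','l','l'] ('n'::'\''::'t'::X) =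
        'n'::'\''::'t':: repC [' ','w','i','l','l'] ['\'','l','l'] X := fun X => by
      simpa using repC_append_ne ' ' ['w','i','l','l'] ['\'','l','l'] ['n','\'','t'] X (by simp)
    have e5 : ∀ X, repC [' ','a','m'] ['\'','m'] ('n'::'\''::'t'::X) =
        'n'::'\''::'t':: repC [' ','a','m'] ['\'','m'] X := fun X => by
      simpa using repC_append_ne ' ' ['a','m'] ['\'','m'] ['n','\'','t'] X (by simp)
    rw [e1, e2, e3, e4, e5, ih]
    simp
  | case3 t h1 h2 ih =>
    obtain ⟨t', rfl⟩ := List.isPrefixOf_iff_prefix.mp h2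
    simp only [List.cons_append, List.nil_append] at h1 h2 ih ⊢
    rw [onePassContr]
    rw [if_neg h1, if_pos h2]
    simp only [List.drop_succ_cons, List.drop_zero] at ih ⊢
    unfold passA at ih ⊢
    have e1 : repC [' ','n','o','t'] ['n','\'','t'] (' '::'a'::'r'::'e'::t') =
        ' '::'a'::'r'::'e':: repC [' ','n','o','t'] ['n','\'','t'] t' := by
      rw [repC_neg _ _ _ _ (by simp [List.isPrefixOf])]
      simpa using repC_append_ne ' ' ['n','o','t'] ['n','\'','t'] ['a','r','e'] t' (by simp)
    have e2 : ∀ X, repC [' ','a','r','e'] ['\'','r','e'] (' '::'a'::'r'::'e'::X) =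
        '\''::'r'::'e':: repC [' ','a','r','e'] ['\'','r','e'] X := fun X => by
      rw [repC_pos _ _ _ _ (by simp [List.isPrefixOf])]; simp
    have e3 : ∀ X, repC [' ','i','s'] ['\'','s'] ('\''::'r'::'e'::X) =
        '\''::'r'::'e':: repC [' ','i','s'] ['\'','s'] X := fun X => by
      simpa using repC_append_ne ' ' ['i','s'] ['\'','s'] ['\'','r','e'] X (by simp)
    have e4 : ∀ X, repC [' ','w','i','l','l'] ['\'','l','l'] ('\''::'r'::'e'::X) =
        '\''::'r'::'e':: repC [' ','w','i','l','l'] ['\'','l','l'] X := fun X => by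
      simpa using repC_append_ne ' ' ['w','i','l','l'] ['\'','l','l'] ['\'','r','e'] X (by simp)
    have e5 : ∀ X, repC [' ','a','m'] ['\'','m'] ('\''::'r'::'e'::X) =
        '\''::'r'::'e':: repC [' ','a','m'] ['\'','m'] X := fun X => by
      simpa using repC_append_ne ' ' ['a','m'] ['\'','m'] ['\'','r','e'] X (by simp)
    rw [e1, e2, e3, e4, e5, ih]
    simp
  | case4 t h1 h2 h3 ih =>
    obtain ⟨t', rfl⟩ := List.isPrefixOf_iff_prefix.mp h3
    simp only [List.cons_append, List.nil_append] at h1 h2 h3 ih ⊢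
    rw [onePassContr]
    rw [if_neg h1, if_neg h2, if_pos h3]
    simp only [List.drop_succ_cons, List.drop_zero] at ih ⊢
    unfold passA at ih ⊢
    have e1 : repC [' ','n','o','t'] ['n','\'','t'] (' '::'i'::'s'::t') =
        ' '::'i'::'s':: repC [' ','n','o','t'] ['n','\'','t'] t' := by
      rw [repC_neg _ _ _ _ (by simp [List.isPrefixOf])]
      simpa using repC_append_ne ' ' ['n','o','t'] ['n','\'','t'] ['i','s'] t' (by simp)
    have e2 : ∀ X, repC [' ','a','r','e'] ['\'','r','e'] (' '::'i'::'s'::X) =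
        ' '::'i'::'s':: repC [' ','a','r','e'] ['\'','r','e'] X := fun X => by
      rw [repC_neg _ _ _ _ (by simp [List.isPrefixOf])]
      simpa using repC_append_ne ' ' ['a','r','e'] ['\'','r','e'] ['i','s'] X (by simp)
    have e3 : ∀ X, repC [' ','i','s'] ['\'','s'] (' '::'i'::'s'::X) =
        '\''::'s':: repC [' ','i','s'] ['\'','s'] X := fun X => by
      rw [repC_pos _ _ _ _ (by simp [List.isPrefixOf])]; simp
    have e4 : ∀ X, repC [' ','w','i','l','l'] ['\'','l','l'] ('\''::'s'::X) =
        '\''::'s':: repC [' ','w','i','l','l'] ['\'','l','l'] X := fun X => by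
      simpa using repC_append_ne ' ' ['w','i','l','l'] ['\'','l','l'] ['\'','s'] X (by simp)
    have e5 : ∀ X, repC [' ','a','m'] ['\'','m'] ('\''::'s'::X) =
        '\''::'s':: repC [' ','a','m'] ['\'','m'] X := fun X => by
      simpa using repC_append_ne ' ' ['a','m'] ['\'','m'] ['\'','s'] X (by simp)
    rw [e1, e2, e3, e4, e5, ih]
    simp
  | case5 t h1 h2 h3 h4 ih =>
    obtain ⟨t', rfl⟩ := List.isPrefixOf_iff_prefix.mp h4
    simp only [List.cons_append, List.nil_append] at h1 h2 h3 h4 ih ⊢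
    rw [onePassContr]
    rw [if_neg h1, if_neg h2, if_neg h3, if_pos h4]
    simp only [List.drop_succ_cons, List.drop_zero] at ih ⊢
    unfold passA at ih ⊢
    have e1 : repC [' ','n','o','t'] ['n','\'','t'] (' '::'w'::'i'::'l'::'l'::t') =
        ' '::'w'::'i'::'l'::'l':: repC [' ','n','o','t'] ['n','\'','t'] t' := by
      rw [repC_neg _ _ _ _ (by simp [List.isPrefixOf])]
      simpa using repC_append_ne ' ' ['n','o','t'] ['n','\'','t'] ['w','i','l','l'] t' (by simp)
    have e2 : ∀ X, repC [' ','a','r','e'] ['\'','r','e'] (' '::'w'::'i'::'l'::'l'::X) =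
        ' '::'w'::'i'::'l'::'l':: repC [' ','a','r','e'] ['\'','r','e'] X := fun X => by
      rw [repC_neg _ _ _ _ (by simp [List.isPrefixOf])]
      simpa using repC_append_ne ' ' ['a','r','e'] ['\'','r','e'] ['w','i','l','l'] X (by simp)
    have e3 : ∀ X, repC [' ','i','s'] ['\'','s'] (' '::'w'::'i'::'l'::'l'::X) =
        ' '::'w'::'i'::'l'::'l':: repC [' ','i','s'] ['\'','s'] X := fun X => by
      rw [repC_neg _ _ _ _ (by simp [List.isPrefixOf])]
      simpa using repC_append_ne ' ' ['i','s'] ['\'','s'] ['w','i','l','l'] X (by simp)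
    have e4 : ∀ X, repC [' ','w','i','l','l'] ['\'','l','l'] (' '::'w'::'i'::'l'::'l'::X) =
        '\''::'l'::'l':: repC [' ','w','i','l','l'] ['\'','l','l'] X := fun X => by
      rw [repC_pos _ _ _ _ (by simp [List.isPrefixOf])]; simp
    have e5 : ∀ X, repC [' ','a','m'] ['\'','m'] ('\''::'l'::'l'::X) =
        '\''::'l'::'l':: repC [' ','a','m'] ['\'','m'] X := fun X => by
      simpa using repC_append_ne ' ' ['a','m'] ['\'','m'] ['\'','l','l'] X (by simp)
    rw [e1, e2, e3, e4, e5, ih]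
    simp
  | case6 t h1 h2 h3 h4 h5 ih =>
    obtain ⟨t', rfl⟩ := List.isPrefixOf_iff_prefix.mp h5
    simp only [List.cons_append, List.nil_append] at h1 h2 h3 h4 h5 ih ⊢
    rw [onePassContr]
    rw [if_neg h1, if_neg h2, if_neg h3, if_neg h4, if_pos h5]
    simp only [List.drop_succ_cons, List.drop_zero] at ih ⊢
    unfold passA at ih ⊢
    have e1 : repC [' ','n','o','t'] ['n','\'','t'] (' '::'a'::'m'::t') =
        ' '::'a'::'m':: repC [' ','n','o','t'] ['n','\'','t'] t' := by
      rw [repC_neg _ _ _ _ (by simp [List.isPrefixOf])]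
      simpa using repC_append_ne ' ' ['n','o','t'] ['n','\'','t'] ['a','m'] t' (by simp)
    have e2 : ∀ X, repC [' ','a','r','e'] ['\'','r','e'] (' '::'a'::'m'::X) =
        ' '::'a'::'m':: repC [' ','a','r','e'] ['\'','r','e'] X := fun X => by
      rw [repC_neg _ _ _ _ (by simp [List.isPrefixOf])]
      simpa using repC_append_ne ' ' ['a','r','e'] ['\'','r','e'] ['a','m'] X (by simp)
    have e3 : ∀ X, repC [' ','i','s'] ['\'','s'] (' '::'a'::'m'::X) =
        ' '::'a'::'m':: repC [' ','i','s'] ['\'','s'] X := fun X => by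
      rw [repC_neg _ _ _ _ (by simp [List.isPrefixOf])]
      simpa using repC_append_ne ' ' ['i','s'] ['\'','s'] ['a','m'] X (by simp)
    have e4 : ∀ X, repC [' ','w','i','l','l'] ['\'','l','l'] (' '::'a'::'m'::X) =
        ' '::'a'::'m':: repC [' ','w','i','l','l'] ['\'','l','l'] X := fun X => by
      rw [repC_neg _ _ _ _ (by simp [List.isPrefixOf])]
      simpa using repC_append_ne ' ' ['w','i','l','l'] ['\'','l','l'] ['a','m'] X (by simp)
    have e5 : ∀ X, repC [' ','a','m'] ['\'','m'] (' '::'a'::'m'::X) =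
        '\''::'m':: repC [' ','a','m'] ['\'','m'] X := fun X => by
      rw [repC_pos _ _ _ _ (by simp [List.isPrefixOf])]; simp
    rw [e1, e2, e3, e4, e5, ih]
    simp
  | case7 t h1 h2 h3 h4 h5 ih =>
    rw [onePassContr]
    rw [if_neg h1, if_neg h2, if_neg h3, if_neg h4, if_neg h5]
    unfold passA at ih ⊢
    have r1 : repC [' ','n','o','t'] ['n','\'','t'] (' ' :: t) =
        ' ' :: repC [' ','n','o','t'] ['n','\'','t'] t := by
      apply repC_neg
      have hb : ['n','o','t'].isPrefixOf t = false := Bool.eq_false_iff.mpr h1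
      simp [List.isPrefixOf, hb]
    have nr2 : ¬ (['a','r','e'] <+: repC [' ','n','o','t'] ['n','\'','t'] t) := by
      intro hx
      have := repC_prefix_reflect [' ','n','o','t'] 'n' ['\'','t'] t.length t ['a','r','e']
        (le_refl _) (by simp) hx
      exact absurd (List.isPrefixOf_iff_prefix.mpr this) h2
    have r2 : repC [' ','a','r','e'] ['\'','r','e'] (' ' :: repC [' ','n','o','t'] ['n','\'','t'] t) =
        ' ' :: repC [' ','a','r','e'] ['\'','r','e'] (repC [' ','n','o','t'] ['n','\'','t'] t) := by
      apply repC_neg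
      rw [Bool.eq_false_iff]
      intro hx
      have := List.cons_prefix_cons.mp (List.isPrefixOf_iff_prefix.mp hx)
      exact nr2 this.2
    have nr3 : ¬ (['i','s'] <+: repC [' ','a','r','e'] ['\'','r','e'] (repC [' ','n','o','t'] ['n','\'','t'] t)) := by
      intro hx
      have hx2 := repC_prefix_reflect [' ','a','r','e'] '\'' ['r','e'] _ _ ['i','s']
        (le_refl _) (by simp) hx
      have hx3 := repC_prefix_reflect [' ','n','o','t'] 'n' ['\'','t'] t.length t ['i','s']
        (le_refl _) (by simp) hx2
      exact absurd (List.isPrefixOf_iff_prefix.mpr hx3) h3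
    have r3 : repC [' ','i','s'] ['\'','s'] (' ' :: repC [' ','a','r','e'] ['\'','r','e'] (repC [' ','n','o','t'] ['n','\'','t'] t)) =
        ' ' :: repC [' ','i','s'] ['\'','s'] (repC [' ','a','r','e'] ['\'','r','e'] (repC [' ','n','o','t'] ['n','\'','t'] t)) := by
      apply repC_neg
      rw [Bool.eq_false_iff]
      intro hx
      have := List.cons_prefix_cons.mp (List.isPrefixOf_iff_prefix.mp hx)
      exact nr3 this.2
    have nr4 : ¬ (['w','i','l','l'] <+: repC [' ','i','s'] ['\'','s'] (repC [' ','a','r','e'] ['\'','r','e'] (repC [' ','n','o','t'] ['n','\'','t'] t))) := by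
      intro hx
      have hx2 := repC_prefix_reflect [' ','i','s'] '\'' ['s'] _ _ ['w','i','l','l']
        (le_refl _) (by simp) hx
      have hx3 := repC_prefix_reflect [' ','a','r','e'] '\'' ['r','e'] _ _ ['w','i','l','l']
        (le_refl _) (by simp) hx2
      have hx4 := repC_prefix_reflect [' ','n','o','t'] 'n' ['\'','t'] t.length t ['w','i','l','l']
        (le_refl _) (by simp) hx3
      exact absurd (List.isPrefixOf_iff_prefix.mpr hx4) h4
    have r4 : repC [' ','w','i','l','l'] ['\'','l','l'] (' ' :: repC [' ','i','s'] ['\'','s'] (repC [' ','a','r','e'] ['\'','r','e'] (repC [' ','n','o','t'] ['n','\'','t'] t))) =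
        ' ' :: repC [' ','w','i','l','l'] ['\'','l','l'] (repC [' ','i','s'] ['\'','s'] (repC [' ','a','r','e'] ['\'','r','e'] (repC [' ','n','o','t'] ['n','\'','t'] t))) := by
      apply repC_neg
      rw [Bool.eq_false_iff]
      intro hx
      have := List.cons_prefix_cons.mp (List.isPrefixOf_iff_prefix.mp hx)
      exact nr4 this.2
    have nr5 : ¬ (['a','m'] <+: repC [' ','w','i','l','l'] ['\'','l','l'] (repC [' ','i','s'] ['\'','s'] (repC [' ','a','r','e'] ['\'','r','e'] (repC [' ','n','o','t'] ['n','\'','t'] t)))) := by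
      intro hx
      have hx2 := repC_prefix_reflect [' ','w','i','l','l'] '\'' ['l','l'] _ _ ['a','m']
        (le_refl _) (by simp) hx
      have hx3 := repC_prefix_reflect [' ','i','s'] '\'' ['s'] _ _ ['a','m']
        (le_refl _) (by simp) hx2
      have hx4 := repC_prefix_reflect [' ','a','r','e'] '\'' ['r','e'] _ _ ['a','m']
        (le_refl _) (by simp) hx3
      have hx5 := repC_prefix_reflect [' ','n','o','t'] 'n' ['\'','t'] t.length t ['a','m']
        (le_refl _) (by simp) hx4
      exact absurd (List.isPrefixOf_iff_prefix.mpr hx5) h5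
    have r5 : repC [' ','a','m'] ['\'','m'] (' ' :: repC [' ','w','i','l','l'] ['\'','l','l'] (repC [' ','i','s'] ['\'','s'] (repC [' ','a','r','e'] ['\'','r','e'] (repC [' ','n','o','t'] ['n','\'','t'] t)))) =
        ' ' :: repC [' ','a','m'] ['\'','m'] (repC [' ','w','i','l','l'] ['\'','l','l'] (repC [' ','i','s'] ['\'','s'] (repC [' ','a','r','e'] ['\'','r','e'] (repC [' ','n','o','t'] ['n','\'','t'] t)))) := by
      apply repC_neg
      rw [Bool.eq_false_iff]
      intro hx
      have := List.cons_prefix_cons.mp (List.isPrefixOf_iff_prefix.mp hx)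
      exact nr5 this.2
    rw [r1, r2, r3, r4, r5, ih]
    simp
  | case8 c t hc ih =>
    rw [onePassContr]
    rw [if_neg hc]
    unfold passA at ih ⊢
    rw [repC_cons_ne _ _ _ _ _ hc, repC_cons_ne _ _ _ _ _ hc, repC_cons_ne _ _ _ _ _ hc,
        repC_cons_ne _ _ _ _ _ hc, repC_cons_ne _ _ _ _ _ hc, ih]

-- ===== VERDICT (by name: the statement is the Claim_ definition above) =====
theorem useContractions_spec : Claim_equal_useContractions := by
  intro text _
  unfold Spec_useContractions useContractions_alt
  rw [useContractions_eq_passA, passA_eq_onePass]
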